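-- pv_equiv track=rewrite | github.com/PopLizardo11/Schedu-CLI | cyc_sched.py | count_job_cat
-- ===== SOURCE A (Python) =====
-- def count_job_cat(sched: list[list[tuple[int]]]) -> dict[str, int]:
--     extracted_rem_hrs: list[list[int]] = [[] for i in range(len(sched))]
--     for i, hrs in enumerate(sched):
--         for h in hrs:
--             extracted_rem_hrs[i].append(h[1])
--
--     job_cat: dict[str, int] = {"full_time": 0, "part_time": 0}
--     for rem_hrs in extracted_rem_hrs:
--         if all(rem_hrs):
--             job_cat["full_time"] += 1
--             continue
--         job_cat["part_time"] += 1
--     return job_cat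
-- ===== SOURCE B (Python) =====
-- def count_job_cat(sched: list[list[tuple[int]]]) -> dict[str, int]:
--     part_rows = {i for i, hrs in enumerate(sched) for h in hrs if h[1] == 0}
--     part = len(part_rows)
--     return {"full_time": len(sched) - part, "part_time": part}
-- ===== Notes on version B (the rewrite author's own statement) =====
-- stated objective: alternative
-- what changed: Replaces the per-row extraction table and twin counters with a flattened set comprehension collecting the indices of rows that contain a zero remaining-hours entry; both counts are then derived arithmetically from that set's size and len(sched).
import Mathlib
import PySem

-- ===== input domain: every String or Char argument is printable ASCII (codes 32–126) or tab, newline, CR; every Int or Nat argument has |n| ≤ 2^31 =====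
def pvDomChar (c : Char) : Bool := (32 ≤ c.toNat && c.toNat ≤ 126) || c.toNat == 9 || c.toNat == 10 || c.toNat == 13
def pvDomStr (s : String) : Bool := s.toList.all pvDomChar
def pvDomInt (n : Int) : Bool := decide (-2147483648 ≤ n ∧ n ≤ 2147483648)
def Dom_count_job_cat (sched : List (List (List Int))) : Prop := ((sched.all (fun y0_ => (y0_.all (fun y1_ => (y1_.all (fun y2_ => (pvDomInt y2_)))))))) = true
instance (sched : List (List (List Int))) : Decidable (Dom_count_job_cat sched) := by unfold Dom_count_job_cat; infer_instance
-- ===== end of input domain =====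

-- B is a different decomposition: a flattened set comprehension collects the indices of
-- part-time rows (rows containing a zero remaining-hours entry); both counts are derived
-- arithmetically from that set's size, instead of A's extraction table and twin counters.

-- ===== PORT A =====
-- 'extracted_rem_hrs[i].append(h[1])': row i is completed exactly while the outer loop
-- visits row i, so the table build is transcribed as appending each finished row.
def count_job_cat (sched : List (List (List Int))) : List (String × Int) :=
  let extracted : List (List Int) :=
    sched.foldl (fun ext hrs =>
      ext ++ [hrs.foldl (fun row h => row ++ [PySem.List.pyGetD h 1 0]) []]) []
  let job_cat : PySem.Dict String Int :=
    PySem.Dict.ofList [("full_time", 0), ("part_time", 0)]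
  let job_cat :=
    extracted.foldl (fun d rem_hrs =>
      if rem_hrs.all (fun x => x != 0) then
        d.insert "full_time" (d.getD "full_time" 0 + 1)
      else
        d.insert "part_time" (d.getD "part_time" 0 + 1)) job_cat
  job_cat.items

-- ===== PORT B =====
-- the set comprehension {i for i, hrs in enumerate(sched) for h in hrs if h[1] == 0}
def count_job_cat_alt (sched : List (List (List Int))) : List (String × Int) :=
  let part_rows : PySem.Set Int :=
    (PySem.List.enumerate sched 0).foldl (fun s p =>
      p.2.foldl (fun s h =>
        if PySem.List.pyGetD h 1 0 == 0 then PySem.Set.add s p.1 else s) s)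
      PySem.Set.empty
  let part : Int := PySem.Set.len part_rows
  [("full_time", (sched.length : Int) - part), ("part_time", part)]

-- ===== PRECONDITION & SPEC =====
-- Pre_ excludes inputs where some innermost list has fewer than 2 elements: there A
-- raises IndexError on h[1].
def Pre_count_job_cat (sched : List (List (List Int))) : Prop :=
  ∀ hrs ∈ sched, ∀ h ∈ hrs, 2 ≤ h.length
instance (sched : List (List (List Int))) : Decidable (Pre_count_job_cat sched) := by
  unfold Pre_count_job_cat; infer_instance
def pvWitness_count_job_cat : List (List (List Int)) := [[[1, 2], [3, 0]], [[5, 7]], []]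

def Spec_count_job_cat (sched : List (List (List Int))) (out : List (String × Int)) : Prop := out = count_job_cat_alt sched
instance (sched : List (List (List Int))) (out : List (String × Int)) : Decidable (Spec_count_job_cat sched out) := by unfold Spec_count_job_cat; infer_instance

-- ===== CLAIM (what is proved, stated in full; the proofs are below) =====
def Claim_equal_count_job_cat : Prop := ∀ (sched : List (List (List Int))), Dom_count_job_cat sched → Pre_count_job_cat sched → Spec_count_job_cat sched (count_job_cat sched)

-- ===== LEMMAS AND PROOFS =====

-- A's dict loop over the extracted rows, from generic counters a and b.
theorem ofList_mk (a b : Int) :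
    PySem.Dict.ofList [("full_time", a), ("part_time", b)]
      = PySem.Dict.mk [("full_time", a), ("part_time", b)] := rfl

theorem dict_loop (ext : List (List Int)) (a b : Int) :
    (ext.foldl (fun d rem_hrs =>
      if rem_hrs.all (fun x => x != 0) then
        d.insert "full_time" (d.getD "full_time" 0 + 1)
      else
        d.insert "part_time" (d.getD "part_time" 0 + 1))
      (PySem.Dict.ofList [("full_time", a), ("part_time", b)])).items
    = [("full_time", a + (ext.countP (fun rem => rem.all (fun x => x != 0)) : Int)),
       ("part_time", b + ((ext.length : Int) - (ext.countP (fun rem => rem.all (fun x => x != 0)) : Int)))] := by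
  induction ext generalizing a b with
  | nil => simp [ofList_mk]
  | cons x xs ih =>
    by_cases hx : (x.all (fun v => v != 0)) = true
    · have step : ((PySem.Dict.ofList [("full_time", a), ("part_time", b)]).insert
          "full_time" ((PySem.Dict.ofList [("full_time", a), ("part_time", b)]).getD "full_time" 0 + 1))
          = PySem.Dict.ofList [("full_time", a + 1), ("part_time", b)] := by
        apply PySem.Dict.ext
        simp [ofList_mk, PySem.Dict.items_insert, PySem.Dict.getD_eq_get?_getD,
              PySem.Dict.get?_mk_cons]
      simp only [List.foldl_cons, hx, if_true, step, ih, List.countP_cons, List.length_cons]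
      simp only [List.cons.injEq, Prod.mk.injEq, true_and, and_true]
      push_cast
      constructor <;> ring
    · have step : ((PySem.Dict.ofList [("full_time", a), ("part_time", b)]).insert
          "part_time" ((PySem.Dict.ofList [("full_time", a), ("part_time", b)]).getD "part_time" 0 + 1))
          = PySem.Dict.ofList [("full_time", a), ("part_time", b + 1)] := by
        apply PySem.Dict.ext
        simp [ofList_mk, PySem.Dict.items_insert, PySem.Dict.getD_eq_get?_getD,
              PySem.Dict.get?_mk_cons]
      simp only [List.foldl_cons, hx, if_false, Bool.false_eq_true, step, ih,
                 List.countP_cons, List.length_cons]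
      simp only [List.cons.injEq, Prod.mk.injEq, true_and, and_true]
      push_cast
      constructor <;> ring

-- the per-row extraction is a map, and testing it is testing the row directly
theorem row_eq (hrs : List (List Int)) :
    (hrs.foldl (fun row h => row ++ [PySem.List.pyGetD h 1 0]) []).all (fun x => x != 0)
    = hrs.all (fun h => PySem.List.pyGetD h 1 0 != 0) := by
  rw [PySem.List.foldl_append_singleton_eq_map]
  simp only [List.nil_append, List.all_map]
  rfl

-- B's inner fold: within one row, the index i is added to the set iff the row
-- contains a zero remaining-hours entry (repeated adds of the same i collapse).
theorem inner_fold (hrs : List (List Int)) (s : PySem.Set Int) (i : Int) :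
    hrs.foldl (fun s h =>
        if PySem.List.pyGetD h 1 0 == 0 then PySem.Set.add s i else s) s
    = if hrs.any (fun h => PySem.List.pyGetD h 1 0 == 0) then PySem.Set.add s i else s := by
  induction hrs generalizing s with
  | nil => simp
  | cons h t ih =>
    simp only [List.foldl_cons, List.any_cons]
    by_cases hz : (PySem.List.pyGetD h 1 0 == 0) = true
    · rw [if_pos hz, ih]
      by_cases ht : (t.any (fun h => PySem.List.pyGetD h 1 0 == 0)) = true
      · rw [if_pos ht, if_pos (by rw [hz, Bool.true_or])]
        exact PySem.Set.add_of_mem (by rw [PySem.Set.mem_add]; right; rfl)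
      · rw [if_neg ht, if_pos (by rw [hz, Bool.true_or])]
    · have hz' : (PySem.List.pyGetD h 1 0 == 0) = false := by simpa using hz
      rw [if_neg hz, ih]
      by_cases ht : (t.any (fun h => PySem.List.pyGetD h 1 0 == 0)) = true
      · rw [if_pos ht, if_pos (by rw [ht, Bool.or_true])]
      · rw [if_neg ht, if_neg (by
          rw [Bool.or_eq_true]
          rintro (hc | hc)
          · rw [hz'] at hc; exact Bool.false_ne_true hc
          · exact ht hc)]

-- B's outer fold: when every element of s is below the next index n, the fold over
-- the enumeration grows s by exactly the number of part-time rows.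
theorem outer_fold (rows : List (List (List Int))) (n : Int) (s : PySem.Set Int)
    (hs : ∀ x ∈ s, x < n) :
    ((PySem.List.enumerate rows n).foldl (fun s p =>
        p.2.foldl (fun s h =>
          if PySem.List.pyGetD h 1 0 == 0 then PySem.Set.add s p.1 else s) s) s).length
    = s.length + rows.countP (fun hrs => hrs.any (fun h => PySem.List.pyGetD h 1 0 == 0)) := by
  induction rows generalizing n s with
  | nil => simp [PySem.List.enumerate_nil]
  | cons r rs ih =>
    rw [PySem.List.enumerate_cons, List.foldl_cons, List.countP_cons]
    dsimp only
    rw [inner_fold]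
    by_cases hr : (r.any (fun h => PySem.List.pyGetD h 1 0 == 0)) = true
    · have hni : n ∉ s := fun hmem => absurd (hs n hmem) (lt_irrefl n)
      rw [if_pos hr, if_pos hr,
        ih (n + 1) (PySem.Set.add s n) (by
          intro x hx
          rcases (PySem.Set.mem_add s n x).mp hx with h' | h'
          · exact lt_trans (hs x h') (by omega)
          · omega),
        PySem.Set.add_of_not_mem hni, List.length_append]
      simp only [List.length_cons, List.length_nil]
      omega
    · rw [if_neg hr, if_neg hr, ih (n + 1) s (fun x hx => lt_trans (hs x hx) (by omega))]
      omega

-- counting rows with a zero plus counting all-nonzero rows exhausts the rows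
theorem count_compl (rows : List (List (List Int))) :
    rows.countP (fun hrs => hrs.any (fun h => PySem.List.pyGetD h 1 0 == 0))
      + rows.countP (fun hrs => hrs.all (fun h => PySem.List.pyGetD h 1 0 != 0))
    = rows.length := by
  induction rows with
  | nil => rfl
  | cons r rs ih =>
    simp only [List.countP_cons, List.length_cons]
    have hpt : (r.any fun h => PySem.List.pyGetD h 1 0 == 0)
        = !(r.all fun h => PySem.List.pyGetD h 1 0 != 0) := by
      simp [List.all_eq_not_any_not, bne]
    by_cases hall : (r.all fun h => PySem.List.pyGetD h 1 0 != 0) = true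
    · rw [if_neg (by simp [hpt, hall]), if_pos hall]
      omega
    · have hf : (r.all fun h => PySem.List.pyGetD h 1 0 != 0) = false := by simpa using hall
      rw [if_pos (by simp [hpt, hf]), if_neg hall]
      omega

-- ===== VERDICT (by name: the statement is the Claim_ definition above) =====
theorem count_job_cat_spec : Claim_equal_count_job_cat := by
  intro sched _ _
  unfold Spec_count_job_cat count_job_cat count_job_cat_alt
  rw [PySem.List.foldl_append_singleton_eq_map, List.nil_append, dict_loop]
  have hcnt : List.countP ((fun rem : List Int => rem.all (fun x => x != 0)) ∘
        (fun hrs => hrs.foldl (fun row h => row ++ [PySem.List.pyGetD h 1 0]) [])) sched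
      = List.countP (fun hrs => hrs.all (fun h => PySem.List.pyGetD h 1 0 != 0)) sched :=
    List.countP_congr (fun x _ => by simp only [Function.comp_apply, row_eq])
  have houter := outer_fold sched 0 PySem.Set.empty (by intro x hx; simp [PySem.Set.empty] at hx)
  have hlen : (PySem.Set.empty : PySem.Set Int).length = 0 := rfl
  rw [hlen, Nat.zero_add] at houter
  have hcompl := count_compl sched
  simp only [List.countP_map, List.length_map, hcnt, PySem.Set.len, houter,
             List.cons.injEq, Prod.mk.injEq, true_and, and_true]
  constructor <;> omega
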